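-- pv_equiv track=rewrite | github.com/PrincipalLewis/Coding_decoding | 6/gamma leven.py | deglev
-- ===== SOURCE A (Python) =====
-- def bin2dec(n):
--     i = 1
--     res = 0
--     while len(n) != 0:
--         if n[-1] == "1":
--             res += i
--         i *= 2
--         n = n[0:-1]
--     return res
--
-- def deglev(n):
--     f = True
--     res = ""
--     while len(n) != 0:
--         if f:
--             n = n[1:]
--             f = False
--         else:
--             res += n[0]
--             n = n[1:]
--             f = True
--     res += "1"
--     res = res[::-1]
--     return bin2dec(res)
-- ===== SOURCE B (Python) =====
-- def deglev(n):
--     res = 0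
--     i = 1
--     k = 1
--     while k < len(n):
--         if n[k] == "1":
--             res += i
--         i *= 2
--         k += 2
--     return res + i
-- ===== Notes on version B (the rewrite author's own statement) =====
-- stated objective: faster
-- what changed: Fused A's two phases (flag-driven extraction into a string, append '1', reverse, bin2dec rescan) into one indexed pass over the odd positions accumulating the value directly with a doubling weight; no helper, no intermediate string, no reversal.
import Mathlib
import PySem

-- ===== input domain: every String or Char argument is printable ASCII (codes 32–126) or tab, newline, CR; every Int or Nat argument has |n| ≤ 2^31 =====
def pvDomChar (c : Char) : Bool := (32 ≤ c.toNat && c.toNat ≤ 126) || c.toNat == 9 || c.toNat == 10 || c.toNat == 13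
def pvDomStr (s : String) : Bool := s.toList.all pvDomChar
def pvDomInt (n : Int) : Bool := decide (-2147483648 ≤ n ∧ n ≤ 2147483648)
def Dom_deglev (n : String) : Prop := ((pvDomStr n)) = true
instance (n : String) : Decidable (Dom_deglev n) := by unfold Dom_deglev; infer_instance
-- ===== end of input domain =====

-- B fuses A's two phases (extract odd-index chars, append '1', reverse, bin2dec) into one
-- indexed pass accumulating the value with a doubling weight; objective: simpler.

-- ===== PORT A =====
-- A's bin2dec while-loop: reads n[-1], doubles i, drops the last char (n = n[0:-1]).
def bin2decLoop (l : List Char) (i res : Int) : Int :=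
  match l with
  | [] => res
  | c :: t =>
      bin2decLoop ((c :: t).dropLast) (i * 2)
        (if (c :: t).getLast (by simp) == '1' then res + i else res)
termination_by l.length
decreasing_by simp

-- A's deglev while-loop: flag f alternates skip / keep-first-char, building res.
def degLoop (l : List Char) (f : Bool) (res : List Char) : List Char :=
  match l with
  | [] => res
  | c :: t => if f then degLoop t false res else degLoop t true (res ++ [c])

def deglev (n : String) : Int :=
  bin2decLoop ((degLoop n.toList true [] ++ ['1']).reverse) 1 0

-- ===== PORT B =====
-- B's single while-loop: k walks the odd indices; res accumulates, i doubles; returns res + i.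
def altLoop (l : List Char) (k : Nat) (i res : Int) : Int :=
  if _h : k < l.length then
    altLoop l (k + 2) (i * 2) (if l.getD k ' ' == '1' then res + i else res)
  else res + i
termination_by l.length - k
decreasing_by omega

def deglev_alt (n : String) : Int := altLoop n.toList 1 1 0

-- ===== PRECONDITION & SPEC =====
def Spec_deglev (n : String) (out : Int) : Prop := out = deglev_alt n
instance (n : String) (out : Int) : Decidable (Spec_deglev n out) := by unfold Spec_deglev; infer_instance

-- ===== CLAIM (what is proved, stated in full; the proofs are below) =====
def Claim_equal_deglev : Prop := ∀ (n : String), Dom_deglev n → Spec_deglev n (deglev n)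

-- ===== LEMMAS AND PROOFS =====

-- chars at even positions of l (used at l.tail, giving A's odd-position extraction)
def every2 : List Char → List Char
  | [] => []
  | [c] => [c]
  | c :: _ :: t => c :: every2 t

theorem every2_cons (c : Char) (t : List Char) : every2 (c :: t) = c :: every2 t.tail := by
  cases t <;> simp [every2]

-- forward value accumulation: what bin2dec computes on the reverse of its input, plus the
-- trailing '1' handled as the final + i
def fwdAlt : List Char → Int → Int → Int
  | [], i, res => res + i
  | c :: t, i, res => fwdAlt t (i * 2) (if c == '1' then res + i else res)

theorem bin2decLoop_concat (l : List Char) (c : Char) (i res : Int) :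
    bin2decLoop (l ++ [c]) i res
      = bin2decLoop l (i * 2) (if c == '1' then res + i else res) := by
  cases l with
  | nil => simp [bin2decLoop]
  | cons a t =>
      conv_lhs => rw [show (a :: t) ++ [c] = a :: (t ++ [c]) from rfl, bin2decLoop]
      have h1 : (a :: (t ++ [c])).dropLast = a :: t := by
        rw [show a :: (t ++ [c]) = (a :: t) ++ [c] from rfl, List.dropLast_concat]
      have h2 : (a :: (t ++ [c])).getLast (by simp) = c := by
        simp
      rw [h1, h2]

theorem bin2decLoop_reverse_concat (m : List Char) (i res : Int) :
    bin2decLoop ((m ++ ['1']).reverse) i res = fwdAlt m i res := by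
  induction m generalizing i res with
  | nil => simp [bin2decLoop, fwdAlt]
  | cons c t ih =>
      have : ((c :: t) ++ ['1']).reverse = (t ++ ['1']).reverse ++ [c] := by simp
      rw [this, bin2decLoop_concat, ih]
      rfl

theorem degLoop_spec (l : List Char) :
    ∀ res : List Char,
      degLoop l false res = res ++ every2 l ∧ degLoop l true res = res ++ every2 l.tail := by
  induction l with
  | nil => intro res; simp [degLoop, every2]
  | cons c t ih =>
      intro res
      constructor
      · rw [degLoop]
        simp only [if_neg (by simp : ¬ false = true)]
        rw [(ih (res ++ [c])).2, every2_cons]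
        simp
      · rw [degLoop]
        rw [if_pos rfl]
        exact (ih res).1

theorem altLoop_eq (l : List Char) (k : Nat) (i res : Int) :
    altLoop l k i res = fwdAlt (every2 (l.drop k)) i res := by
  by_cases h : k < l.length
  · rw [altLoop]
    simp only [dif_pos h]
    rw [altLoop_eq l (k + 2) (i * 2)]
    have hd : l.drop k = l[k] :: l.drop (k + 1) := List.drop_eq_getElem_cons h
    have ht : (l.drop (k + 1)).tail = l.drop (k + 2) := by
      rw [List.tail_drop]
    rw [hd, every2_cons, ht, fwdAlt]
    have : l.getD k ' ' = l[k] := by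
      simp [List.getD, List.getElem?_eq_getElem h]
    rw [this]
  · rw [altLoop]
    simp only [dif_neg h]
    have : l.drop k = [] := List.drop_eq_nil_of_le (by omega)
    rw [this]
    simp [every2, fwdAlt]
termination_by l.length - k
decreasing_by omega

-- ===== VERDICT (by name: the statement is the Claim_ definition above) =====
theorem deglev_spec : Claim_equal_deglev := by
  intro n _
  unfold Spec_deglev deglev deglev_alt
  rw [(degLoop_spec n.toList []).2, List.nil_append,
      bin2decLoop_reverse_concat, altLoop_eq, List.drop_one]
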